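-- pv_equiv track=rewrite | github.com/rhkrdudrb/py | (LV2)프로세스.py | solution
-- ===== SOURCE A (Python) =====
-- from collections import deque
-- from collections import deque
-- from collections import deque
-- from collections import deque
--
-- def solution(priorities, location):
--     answer = 0
--     queue = deque(priorities)
--     check = deque([0 for _ in range(len(priorities))])
--     check[location] = 1
--     while queue:
--         priorities = queue.popleft()
--         checkpop = check.popleft()
--         if queue and priorities < max(queue) :
--             queue.append(priorities)
--             check.append(checkpop)
--         else :
--             answer+=1
--             if checkpop == 1:
--                 return answer
-- ===== SOURCE B (Python) =====
-- def solution(priorities, location):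
--     if location < 0:
--         location += len(priorities)
--     jobs = [(p, i == location) for i, p in enumerate(priorities)]
--     answer = 0
--     while True:
--         m = max(p for p, _ in jobs)
--         k = next(i for i, (p, _) in enumerate(jobs) if p == m)
--         answer += 1
--         if jobs[k][1]:
--             return answer
--         jobs = jobs[k + 1:] + jobs[:k]
-- ===== Notes on version B (the rewrite author's own statement) =====
-- stated objective: faster
-- what changed: B replaces A's unit-rotation deque simulation (which re-scans max(queue) on every single rotation) by a per-print step: find the first maximal job directly, count it, and continue on the slice jobs[k+1:]+jobs[:k], so the O(n) max scan runs once per printed job instead of once per rotation.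
import Mathlib
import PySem

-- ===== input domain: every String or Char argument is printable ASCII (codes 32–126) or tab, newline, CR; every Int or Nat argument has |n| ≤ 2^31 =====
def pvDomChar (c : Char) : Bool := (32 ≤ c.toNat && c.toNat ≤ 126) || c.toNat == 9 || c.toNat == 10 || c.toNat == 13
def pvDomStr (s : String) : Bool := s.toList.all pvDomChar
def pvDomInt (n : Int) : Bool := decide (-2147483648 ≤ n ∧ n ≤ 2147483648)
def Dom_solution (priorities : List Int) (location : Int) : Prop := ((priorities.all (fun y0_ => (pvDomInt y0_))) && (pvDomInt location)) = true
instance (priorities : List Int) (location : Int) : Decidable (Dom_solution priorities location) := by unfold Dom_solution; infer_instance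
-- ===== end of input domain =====

-- B prints the first maximal job in one step (argmax + slice) instead of A's one-at-a-time
-- deque rotations with a max(queue) scan per rotation (a timing run decides any speed label;
-- return-value equivalence only).

-- ===== PORT A =====
-- A's while loop; fuel makes the recursion total (≤ n rotations precede each of the ≤ n prints,
-- so n*n + 2*n + 1 steps always suffice; on exhaustion / empty queue both arms return 0,
-- matching the unreachable 'while' exit where Python A returns None).
def solLoopA : Nat → List Int → List Int → Int → Int
  | 0, _, _, _ => 0
  | _ + 1, [], _, _ => 0
  | _ + 1, _ :: _, [], _ => 0          -- unreachable: check has the same length as queue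
  | f + 1, p :: rest, c :: chk, ans =>
      -- 'if queue and priorities < max(queue)'
      if rest ≠ [] ∧ p < (PySem.List.max? rest (fun y => y)).getD 0 then
        solLoopA f (rest ++ [p]) (chk ++ [c]) ans
      else if c = 1 then ans + 1 else solLoopA f rest chk (ans + 1)

def solution (priorities : List Int) (location : Int) : Int :=
  let n := priorities.length
  -- 'check[location] = 1' ported by hand: Python's negative-index rule; out of range raises
  -- IndexError (excluded by Pre_solution; the 0 returned there is never claimed about).
  let i := if location < 0 then location + (n : Int) else location
  if 0 ≤ i ∧ i < (n : Int) then
    solLoopA (n * n + 2 * n + 1) priorities ((List.replicate n (0 : Int)).set i.toNat 1) 0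
  else 0

-- ===== PORT B =====
-- Source B's 'while True' loop: m = max priority, k = index of the first maximal job ('next(…)');
-- it is printed in one step and the loop continues on the slice jobs[k+1:] + jobs[:k].
-- One job leaves the list per step, so fuel = the number of jobs makes the recursion total;
-- the 0 on exhaustion sits where Source B's max()/next() would raise on an empty jobs list,
-- which is unreachable under Pre_solution.
def solLoopB : Nat → List (Int × Bool) → Int → Int
  | 0, _, _ => 0
  | _ + 1, [], _ => 0
  | g + 1, jb :: jobs, ans =>
      let m := (PySem.List.max? ((jb :: jobs).map Prod.fst) (fun y => y)).getD 0
      let k := (jb :: jobs).findIdx (fun j => j.1 == m)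
      if ((jb :: jobs).getD k (0, false)).2 then ans + 1
      else solLoopB g ((jb :: jobs).drop (k + 1) ++ (jb :: jobs).take k) (ans + 1)

def solution_alt (priorities : List Int) (location : Int) : Int :=
  -- 'if location < 0: location += len(priorities)'
  let loc := if location < 0 then location + (priorities.length : Int) else location
  -- 'jobs = [(p, i == location) for i, p in enumerate(priorities)]'
  let jobs := (PySem.List.enumerate priorities).map (fun ip => (ip.2, ip.1 == loc))
  solLoopB jobs.length jobs 0

-- ===== PRECONDITION & SPEC =====
-- Pre_ excludes exactly the inputs where Python A raises IndexError at 'check[location] = 1':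
-- the empty list and a location outside [-len, len).
def Pre_solution (priorities : List Int) (location : Int) : Prop :=
  priorities ≠ [] ∧ -(priorities.length : Int) ≤ location ∧ location < (priorities.length : Int)
instance (priorities : List Int) (location : Int) : Decidable (Pre_solution priorities location) := by
  unfold Pre_solution; infer_instance

def pvWitness_solution : List Int × Int := ([2, 1, 3, 2], 2)

def Spec_solution (priorities : List Int) (location : Int) (out : Int) : Prop := out = solution_alt priorities location
instance (priorities : List Int) (location : Int) (out : Int) : Decidable (Spec_solution priorities location out) := by unfold Spec_solution; infer_instance

-- ===== CLAIM (what is proved, stated in full; the proofs are below) =====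
def Claim_equal_solution : Prop := ∀ (priorities : List Int) (location : Int), Dom_solution priorities location → Pre_solution priorities location → Spec_solution priorities location (solution priorities location)

-- ===== LEMMAS AND PROOFS =====

-- the first maximal index lies inside the list
lemma findIdxMax_lt (jobs : List (Int × Bool)) (h : ¬ jobs = []) :
    jobs.findIdx (fun j => j.1 == (PySem.List.max? (jobs.map Prod.fst) (fun y => y)).getD 0)
      < jobs.length := by
  apply List.findIdx_lt_length_of_exists
  cases hm : PySem.List.max? (jobs.map Prod.fst) (fun y => y) with
  | none =>
      exact absurd (List.map_eq_nil_iff.mp ((PySem.List.max?_eq_none_iff _ _).mp hm)) h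
  | some m =>
      obtain ⟨j, hj, hjm⟩ := List.mem_map.mp (PySem.List.max?_mem hm)
      exact ⟨j, hj, by simp [hjm]⟩

-- solLoopB's step equation phrased for an abstract nonempty list
lemma solLoopB_ne (g : Nat) (jobs : List (Int × Bool)) (h : jobs ≠ []) (ans : Int) :
    solLoopB (g + 1) jobs ans =
      (if (jobs.getD (jobs.findIdx (fun j =>
            j.1 == (PySem.List.max? (jobs.map Prod.fst) (fun y => y)).getD 0)) (0, false)).2
       then ans + 1
       else solLoopB g
          (jobs.drop ((jobs.findIdx (fun j =>
              j.1 == (PySem.List.max? (jobs.map Prod.fst) (fun y => y)).getD 0)) + 1)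
            ++ jobs.take (jobs.findIdx (fun j =>
              j.1 == (PySem.List.max? (jobs.map Prod.fst) (fun y => y)).getD 0)))
          (ans + 1)) := by
  cases jobs with
  | nil => exact absurd rfl h
  | cons x r => rfl

-- A's check value for a (priority, is-target) job
def chkOf (j : Int × Bool) : Int := if j.2 then 1 else 0

-- A's loop rotates past the (strictly smaller) prefix 'pre' and then prints x,
-- leaving the queue 'post ++ pre'
lemma stepA : ∀ (pre : List (Int × Bool)) (x : Int × Bool) (post : List (Int × Bool))
    (f : Nat) (ans : Int),
    (∀ y ∈ pre, y.1 < x.1) → (∀ y ∈ post, y.1 ≤ x.1) →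
    solLoopA (f + pre.length + 1) ((pre ++ x :: post).map Prod.fst)
        ((pre ++ x :: post).map chkOf) ans
      = if x.2 then ans + 1
        else solLoopA f ((post ++ pre).map Prod.fst) ((post ++ pre).map chkOf) (ans + 1) := by
  intro pre
  induction pre with
  | nil =>
      intro x post f ans _ hpost
      simp only [List.nil_append, List.map_cons, List.length_nil]
      rw [solLoopA]
      have hcond : ¬ ((post.map Prod.fst) ≠ [] ∧
          x.1 < (PySem.List.max? (post.map Prod.fst) (fun y => y)).getD 0) := by
        rintro ⟨hne, hlt⟩
        cases hm : PySem.List.max? (post.map Prod.fst) (fun y => y) with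
        | none => exact hne ((PySem.List.max?_eq_none_iff _ _).mp hm)
        | some m =>
            obtain ⟨j, hj, hjm⟩ := List.mem_map.mp (PySem.List.max?_mem hm)
            rw [hm] at hlt
            simp only [Option.getD_some] at hlt
            exact absurd (lt_of_lt_of_le hlt (hjm ▸ hpost j hj)) (not_lt.mpr le_rfl)
      rw [if_neg hcond]
      cases hx : x.2 with
      | true => simp [chkOf, hx]
      | false => simp [chkOf, hx]
  | cons a pre' ih =>
      intro x post f ans hpre hpost
      have hax : a.1 < x.1 := hpre a List.mem_cons_self
      simp only [List.cons_append, List.map_cons, List.length_cons]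
      have hfe : f + (pre'.length + 1) + 1 = (f + pre'.length + 1) + 1 := by omega
      rw [hfe, solLoopA]
      have hxmem : x.1 ∈ (pre' ++ x :: post).map Prod.fst :=
        List.mem_map.mpr ⟨x, by simp, rfl⟩
      have hcond : ((pre' ++ x :: post).map Prod.fst) ≠ [] ∧
          a.1 < (PySem.List.max? ((pre' ++ x :: post).map Prod.fst) (fun y => y)).getD 0 := by
        refine ⟨List.ne_nil_of_mem hxmem, ?_⟩
        cases hm : PySem.List.max? ((pre' ++ x :: post).map Prod.fst) (fun y => y) with
        | none => exact absurd ((PySem.List.max?_eq_none_iff _ _).mp hm) (List.ne_nil_of_mem hxmem)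
        | some m =>
            have := PySem.List.max?_isMax hm x.1 hxmem
            simp only [Option.getD_some]
            exact lt_of_lt_of_le hax this
      rw [if_pos hcond]
      have h1 : ((pre' ++ x :: post).map Prod.fst) ++ [a.1]
          = (pre' ++ x :: (post ++ [a])).map Prod.fst := by simp
      have h2 : ((pre' ++ x :: post).map chkOf) ++ [chkOf a]
          = (pre' ++ x :: (post ++ [a])).map chkOf := by simp
      rw [h1, h2, ih x (post ++ [a]) f ans
        (fun y hy => hpre y (List.mem_cons_of_mem a hy))
        (by intro y hy
            rcases List.mem_append.mp hy with hy | hy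
            · exact hpost y hy
            · simp only [List.mem_singleton] at hy; exact hy ▸ le_of_lt hax)]
      have h3 : (post ++ [a]) ++ pre' = post ++ a :: pre' := by simp
      rw [h3]

-- lockstep: with enough fuel A's rotation loop computes B's per-print recursion
lemma loop_eq : ∀ (n : Nat) (jobs : List (Int × Bool)) (f g : Nat) (ans : Int),
    jobs.length = n → n * n + 1 ≤ f → n ≤ g →
    solLoopA f (jobs.map Prod.fst) (jobs.map chkOf) ans = solLoopB g jobs ans := by
  intro n
  induction n with
  | zero =>
      intro jobs f g ans hlen hf _
      rw [List.length_eq_zero_iff.mp hlen]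
      obtain ⟨f', rfl⟩ : ∃ f', f = f' + 1 := ⟨f - 1, by omega⟩
      cases g <;> rfl
  | succ n ih =>
      intro jobs f g ans hlen hf hg
      have hne : ¬ jobs = [] := by
        intro h; rw [h] at hlen; simp at hlen
      obtain ⟨g', rfl⟩ : ∃ g', g = g' + 1 := ⟨g - 1, by omega⟩
      rw [solLoopB_ne g' jobs hne ans]
      set m := (PySem.List.max? (jobs.map Prod.fst) (fun y => y)).getD 0 with hm
      set k := jobs.findIdx (fun j => j.1 == m) with hk
      have hklt : k < jobs.length := findIdxMax_lt jobs hne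
      -- decompose jobs at the first maximal index k
      have hdecomp : jobs = jobs.take k ++ jobs[k] :: jobs.drop (k + 1) := by
        conv_lhs => rw [← List.take_append_drop k jobs]
        rw [List.drop_eq_getElem_cons hklt]
      have hxk : jobs[k].1 = m := by
        have := List.findIdx_getElem (p := fun j : Int × Bool => j.1 == m) (w := hklt)
        simpa using this
      have hmax : ∀ y ∈ jobs, y.1 ≤ m := by
        intro y hy
        cases hmm : PySem.List.max? (jobs.map Prod.fst) (fun y => y) with
        | none => exact absurd (List.map_eq_nil_iff.mp ((PySem.List.max?_eq_none_iff _ _).mp hmm)) hne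
        | some mv =>
            have := PySem.List.max?_isMax hmm y.1 (List.mem_map.mpr ⟨y, hy, rfl⟩)
            simp only [hm, hmm, Option.getD_some]
            exact this
      have hlenk : (jobs.take k).length = k := by
        simp; omega
      have hpre : ∀ y ∈ jobs.take k, y.1 < jobs[k].1 := by
        intro y hy
        obtain ⟨i, hi, hig⟩ := List.getElem_of_mem hy
        have hik : i < k := hlenk ▸ hi
        have hji : jobs[i]'(lt_trans hik hklt) = y := by
          simp only [List.getElem_take] at hig
          exact hig
        have hni := List.not_of_lt_findIdx (p := fun j : Int × Bool => j.1 == m) (hk ▸ hik)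
        have hni' : ¬ y.1 = m := by
          rw [← hji]; simpa using hni
        rw [hxk]
        exact lt_of_le_of_ne (hmax y (List.mem_of_mem_take hy)) hni'
      have hpost : ∀ y ∈ jobs.drop (k + 1), y.1 ≤ jobs[k].1 := by
        intro y hy
        rw [hxk]; exact hmax y (List.mem_of_mem_drop hy)
      have hgetD : jobs.getD k (0, false) = jobs[k] := by
        simp [List.getD, List.getElem?_eq_getElem hklt]
      have hfk : k + 1 ≤ f := by
        have : k ≤ n := by omega
        nlinarith
      obtain ⟨f', hf'⟩ : ∃ f', f = f' + k + 1 := ⟨f - k - 1, by omega⟩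
      have hstep := stepA (jobs.take k) jobs[k] (jobs.drop (k + 1)) f' ans hpre hpost
      rw [hlenk] at hstep
      rw [← hdecomp] at hstep
      rw [hf', hstep, hgetD]
      cases hx : jobs[k].2 with
      | true => simp
      | false =>
          simp only [Bool.false_eq_true, if_false]
          exact ih (jobs.drop (k + 1) ++ jobs.take k) f' g' (ans + 1)
            (by simp [hlenk]; omega) (by nlinarith) (by omega)

-- the guard on the normalised index holds under Pre_
lemma pre_index (priorities : List Int) (location : Int) (hpre : Pre_solution priorities location) :
    0 ≤ (if location < 0 then location + (priorities.length : Int) else location) ∧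
      (if location < 0 then location + (priorities.length : Int) else location) < (priorities.length : Int) := by
  obtain ⟨-, h1, h2⟩ := hpre
  split <;> omega

-- ===== VERDICT (by name: the statement is the Claim_ definition above) =====
theorem solution_spec : Claim_equal_solution := by
  intro priorities location _ hpre
  unfold Spec_solution solution solution_alt
  have hidx := pre_index priorities location hpre
  rw [if_pos hidx]
  set n := priorities.length with hn
  set loc := (if location < 0 then location + (n : Int) else location) with hloc
  set jobs := (PySem.List.enumerate priorities).map (fun ip => (ip.2, ip.1 == loc)) with hjobs
  have hfst : jobs.map Prod.fst = priorities := by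
    rw [hjobs, List.map_map]
    exact PySem.List.map_snd_enumerate priorities 0
  have hchk : jobs.map chkOf = (List.replicate n (0 : Int)).set loc.toNat 1 := by
    apply List.ext_getElem
    · simp [hjobs, PySem.List.length_enumerate, hn]
    · intro i h1 h2
      simp only [hjobs, List.map_map, List.getElem_map, PySem.List.getElem_enumerate,
        Function.comp, List.getElem_set, List.getElem_replicate]
      have hi : i < n := by simpa [hjobs, PySem.List.length_enumerate, hn] using h1
      by_cases hcase : loc.toNat = i
      · have heq : (i : Int) = loc := by omega
        simp [chkOf, heq, hcase]
      · have hneq : ¬ (i : Int) = loc := by omega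
        simp [chkOf, hneq, hcase]
  have hjlen : jobs.length = n := by
    simp [hjobs, PySem.List.length_enumerate, hn]
  have := loop_eq n jobs (n * n + 2 * n + 1) jobs.length 0 hjlen (by omega) (by omega)
  rw [hfst, hchk] at this
  exact this
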